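-- pv_equiv track=rewrite | github.com/Bismaya7735B/Bismaya7735B | stringdelete.py | find_repetitive_chars
-- ===== SOURCE A (Python) =====
-- def find_repetitive_chars(str):#to delete or replace string
--     # Initialize an empty string to store repetitive characters
--     repetitive_chars = ''
--     s=''
--     # Iterate over each character in the string
--     for i in range(len(str)):
--         # Check if the character is already in repetitive_chars
--         if str[i] not in repetitive_chars:
--             # Check if the character appears again in the rest of the string
--             for j in range(i + 1, len(str)):
--                 if str[i] == str[j]:
--                     # If the character is repetitive and not already in repetitive_chars, add it
--                     repetitive_chars += str[i]
--                     break
--     for i in str: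
--         if i in repetitive_chars:
--             #s+="*"
--             s+=''
--         else:
--             s+=i
--     return s
-- ===== SOURCE B (Python) =====
-- def find_repetitive_chars(str):
--     counts = {}
--     for c in str:
--         counts[c] = counts.get(c, 0) + 1
--     return ''.join(c for c in str if counts[c] == 1)
-- ===== Notes on version B (the rewrite author's own statement) =====
-- stated objective: simpler
-- what changed: Replaces A's nested index scans and the membership-in-accumulated-duplicates pass by a single frequency-count pass followed by one filter keeping characters of count 1.
import Mathlib
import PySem

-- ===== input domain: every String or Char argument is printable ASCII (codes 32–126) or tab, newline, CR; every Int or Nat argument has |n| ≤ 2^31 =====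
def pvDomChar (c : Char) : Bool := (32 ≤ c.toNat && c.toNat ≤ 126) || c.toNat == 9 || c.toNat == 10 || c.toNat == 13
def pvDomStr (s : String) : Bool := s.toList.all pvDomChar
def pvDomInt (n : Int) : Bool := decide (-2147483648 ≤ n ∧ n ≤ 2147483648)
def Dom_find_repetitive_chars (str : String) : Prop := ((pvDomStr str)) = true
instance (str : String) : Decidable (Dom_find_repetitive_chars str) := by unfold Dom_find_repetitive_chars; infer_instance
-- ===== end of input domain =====

-- B removes characters occurring more than once via one frequency-count pass plus one filter,
-- replacing A's nested duplicate scans: a simpler, shorter decomposition.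

-- ===== PORT A =====
-- first loop of A: walk the string; at each position, char c with the rest of the string after it;
-- 'str[i] not in repetitive_chars' is the membership test, the inner j-loop (scan of the rest for
-- an equal char, with break) is 'rest.contains c'.
def pvRepScan : List Char → List Char → List Char
  | rep, [] => rep
  | rep, c :: rest =>
    if rep.contains c then pvRepScan rep rest
    else if rest.contains c then pvRepScan (rep ++ [c]) rest
    else pvRepScan rep rest

def find_repetitive_chars (str : String) : String :=
  let repetitive_chars := pvRepScan [] str.toList
  -- second loop: s += '' when i in repetitive_chars else s += i
  let s := str.toList.foldl (fun s i => if repetitive_chars.contains i then s else s ++ [i]) []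
  String.mk s

-- ===== PORT B =====
def find_repetitive_chars_alt (str : String) : String :=
  let counts := str.toList.foldl (fun d c => d.insert c (d.getD c 0 + 1)) PySem.Dict.empty
  -- counts[c]: c is drawn from str, so the key is always present; getD is exact here
  String.mk (str.toList.filter (fun c => counts.getD c 0 == (1 : Int)))

-- ===== PRECONDITION & SPEC =====
def Spec_find_repetitive_chars (str : String) (out : String) : Prop := out = find_repetitive_chars_alt str
instance (str : String) (out : String) : Decidable (Spec_find_repetitive_chars str out) := by unfold Spec_find_repetitive_chars; infer_instance

-- ===== CLAIM (what is proved, stated in full; the proofs are below) =====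
def Claim_equal_find_repetitive_chars : Prop := ∀ (str : String), Dom_find_repetitive_chars str → Spec_find_repetitive_chars str (find_repetitive_chars str)

-- ===== LEMMAS AND PROOFS =====

theorem mem_pvRepScan (t : List Char) : ∀ (rep : List Char) (c : Char),
    c ∈ pvRepScan rep t ↔ c ∈ rep ∨ 2 ≤ t.count c := by
  induction t with
  | nil => intro rep c; simp [pvRepScan]
  | cons a rest ih =>
    intro rep c
    by_cases hca : c = a
    · subst hca
      by_cases hr : rep.contains c
      · have hm : c ∈ rep := (List.contains_iff_mem ..).mp hr
        simp only [pvRepScan, hr, if_pos, ih]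
        simp [hm]
      · by_cases ht : rest.contains c
        · have h1 : 1 ≤ rest.count c :=
            List.one_le_count_iff.mpr ((List.contains_iff_mem ..).mp ht)
          simp only [pvRepScan, hr, ht, Bool.false_eq_true, if_neg, if_pos,
            not_false_iff, ih]
          constructor
          · intro _; right; rw [List.count_cons_self]; omega
          · intro _; left; simp [List.mem_append]
        · have h0 : rest.count c = 0 := by
            by_contra h
            exact ht ((List.contains_iff_mem ..).mpr
              (List.one_le_count_iff.mp (by omega)))
          simp only [pvRepScan, hr, ht, Bool.false_eq_true, if_neg,
            not_false_iff, ih]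
          simp [List.count_cons_self, h0, (List.contains_iff_mem ..).not.mp hr]
    · have hac : ¬ a = c := fun h => hca h.symm
      by_cases hr : rep.contains a
      · simp only [pvRepScan, hr, if_pos, ih]
        simp [List.count_cons, hac]
      · by_cases ht : rest.contains a
        · simp only [pvRepScan, hr, ht, Bool.false_eq_true, if_neg, if_pos,
            not_false_iff, ih]
          simp [List.count_cons, hac, List.mem_append, hca]
        · simp only [pvRepScan, hr, ht, Bool.false_eq_true, if_neg,
            not_false_iff, ih]
          simp [List.count_cons, hac]

theorem foldl_skip_or_append (l : List Char) (p : Char → Bool) : ∀ (acc : List Char),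
    l.foldl (fun s i => if p i then s else s ++ [i]) acc = acc ++ l.filter (fun i => !p i) := by
  induction l with
  | nil => intro acc; simp
  | cons a t ih =>
    intro acc
    by_cases h : p a <;> simp [List.foldl_cons, h, ih, List.filter_cons]

theorem find_repetitive_chars_spec : Claim_equal_find_repetitive_chars := by
  intro str _
  unfold Spec_find_repetitive_chars find_repetitive_chars find_repetitive_chars_alt
  simp only [foldl_skip_or_append, List.nil_append]
  congr 1
  apply List.filter_congr
  intro c hc
  have hcnt : (str.toList.foldl (fun d c => d.insert c (d.getD c 0 + 1)) PySem.Dict.empty).getD c 0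
      = (str.toList.count c : Int) := by
    simp [PySem.Dict.getD_foldl_insert_add_one, PySem.Dict.getD_empty]
  have hmem := mem_pvRepScan str.toList [] c
  have h1 : 1 ≤ str.toList.count c := List.one_le_count_iff.mpr hc
  simp only [hcnt]
  by_cases h2 : 2 ≤ str.toList.count c
  · have hcon : (pvRepScan [] str.toList).contains c = true :=
      (List.contains_iff_mem ..).mpr (hmem.mpr (Or.inr h2))
    have hne : (str.toList.count c : Int) ≠ 1 := by
      have : str.toList.count c ≠ 1 := by omega
      exact_mod_cast this
    simp [hmem, h2, hne]
  · have hone : str.toList.count c = 1 := by omega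
    have hnm : ¬ c ∈ pvRepScan [] str.toList := by
      intro h; rcases hmem.mp h with h | h
      · simp at h
      · omega
    simp [hnm, hone]
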